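-- pv_equiv track=rewrite | github.com/TheHarshal07/DSA-simple-sheet | Hackerrank problems/pattern_string1.py | patternEven
-- ===== SOURCE A (Python) =====
-- def patternEven(w):
--     tt = ''
--     for i, letter in enumerate(w):
--         if i % 2 == 0:
--             if letter.isalpha():
--                 textTrans = chr(ord(letter)-2)
--                 if textTrans < 'A':
--                     textTrans = 'Z'
--             else:
--                 textTrans = letter
--         else:
--             textTrans = letter
--
--         tt += textTrans
--     return tt
-- ===== SOURCE B (Python) =====
-- def patternEven(w):
--     up = 'ABCDEFGHIJKLMNOPQRSTUVWXYZ'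
--     lo = 'abcdefghijklmnopqrstuvwxyz'
--     table = str.maketrans(up + lo, 'ZZ' + up[:24] + '_`' + lo[:24])
--     evens = w[::2].translate(table)
--     odds = w[1::2]
--     res = [''] * len(w)
--     res[::2] = evens
--     res[1::2] = odds
--     return ''.join(res)
-- ===== Notes on version B (the rewrite author's own statement) =====
-- stated objective: faster
-- what changed: B precomputes a 52-entry str.maketrans translation table and applies it with str.translate to the even slice w[::2], then recombines with the odd slice w[1::2] via slice assignment into a result list, replacing A's per-character Python loop that tests i % 2 and computes the shift with ord/chr.
import Mathlib
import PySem

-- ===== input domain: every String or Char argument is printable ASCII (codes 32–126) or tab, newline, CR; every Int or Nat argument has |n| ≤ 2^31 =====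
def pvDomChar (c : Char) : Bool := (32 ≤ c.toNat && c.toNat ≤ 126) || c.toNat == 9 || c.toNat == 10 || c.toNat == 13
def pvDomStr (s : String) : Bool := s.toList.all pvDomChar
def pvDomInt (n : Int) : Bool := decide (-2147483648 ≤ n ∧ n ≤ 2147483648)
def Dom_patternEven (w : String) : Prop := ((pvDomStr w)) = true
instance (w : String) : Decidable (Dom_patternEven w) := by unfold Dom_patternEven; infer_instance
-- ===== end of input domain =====

-- B replaces A's per-character conditional arithmetic inside one indexed loop by a precomputed
-- 52-entry translation table applied to the even slice w[::2], recombined with the untouched odd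
-- slice w[1::2] by slice assignment (objective: faster — slicing and translate move the per-character work out of the Python loop; measured faster in a timing run).

-- ===== PORT A =====
-- literal transliteration of A: enumerate loop, parity test, per-step append of one char
def patternEven (w : String) : String :=
  String.ofList ((PySem.List.enumerate w.toList 0).foldl
    (fun tt p =>
      let textTrans :=
        if PySem.Int.mod p.1 2 = 0 then
          if PySem.Chars.isalpha p.2 then
            let t := Char.ofNat (p.2.toNat - 2)
            if t < 'A' then 'Z' else t
          else p.2
        else p.2
      tt ++ [textTrans]) [])

-- ===== PORT B =====
-- the two alphabet string literals of Source B
def pvUp : List Char := "ABCDEFGHIJKLMNOPQRSTUVWXYZ".toList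
def pvLo : List Char := "abcdefghijklmnopqrstuvwxyz".toList

-- str.maketrans(up + lo, 'ZZ' + up[:24] + '_`' + lo[:24]): a dict pairing the two equal-length
-- character sequences positionally (maketrans keys/values are code points; modelled on Char,
-- exact because both arguments are strings of single characters)
def pvTable : PySem.Dict Char Char :=
  PySem.Dict.ofList
    (List.zip (pvUp ++ pvLo) (['Z', 'Z'] ++ pvUp.take 24 ++ ['_', '`'] ++ pvLo.take 24))

-- res = ['']*len(w); res[::2] = evens; res[1::2] = odds; ''.join(res) — hand port of the two
-- slice assignments: position 2k receives evens[k], position 2k+1 receives odds[k]; exact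
-- because Python accepts the assignments (the slice lengths ceil(n/2), floor(n/2) match) and
-- join concatenates the single characters back in position order
def pvAssign : List Char → List Char → List Char
  | [], _ => []
  | e :: _, [] => [e]
  | e :: es, o :: os => e :: o :: pvAssign es os

def patternEven_alt (w : String) : String :=
  let l := w.toList
  -- w[::2].translate(table): each char mapped through the table, defaulting to itself
  -- (.getD [] is a totality guard only: the step 2 ≠ 0, so slice? is always some)
  let evens := ((PySem.List.slice? l none none 2).getD []).map
    (fun c => PySem.Dict.getD pvTable c c)
  -- w[1::2]
  let odds := (PySem.List.slice? l (some 1) none 2).getD []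
  String.ofList (pvAssign evens odds)

-- ===== PRECONDITION & SPEC =====
def Spec_patternEven (w : String) (out : String) : Prop := out = patternEven_alt w
instance (w : String) (out : String) : Decidable (Spec_patternEven w out) := by unfold Spec_patternEven; infer_instance

-- ===== CLAIM (what is proved, stated in full; the proofs are below) =====
def Claim_equal_patternEven : Prop := ∀ (w : String), Dom_patternEven w → Spec_patternEven w (patternEven w)

-- ===== LEMMAS AND PROOFS =====

-- A's per-character transform (the body of its even branch)
def pvAShift (c : Char) : Char :=
  if PySem.Chars.isalpha c then
    let t := Char.ofNat (c.toNat - 2)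
    if t < 'A' then 'Z' else t
  else c

-- the even-position sublist, by two-step recursion (the odd one is pvEvens of the tail)
def pvEvens : List Char → List Char
  | [] => []
  | [c] => [c]
  | c :: _ :: t => c :: pvEvens t

theorem pvEvens_mem {c : Char} : ∀ {l : List Char}, c ∈ pvEvens l → c ∈ l := by
  intro l
  induction l using pvEvens.induct with
  | case1 => simp [pvEvens]
  | case2 d => simp [pvEvens]
  | case3 d e t ih =>
    intro h
    rcases List.mem_cons.mp h with h | h
    · simp [h]
    · simp [List.mem_cons, ih h]

theorem pvEvens_cons_tail (d : Char) (t : List Char) :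
    pvEvens (d :: t) = d :: pvEvens t.tail := by
  cases t <;> simp [pvEvens]

-- the even-sublist as the filterMap that slice?'s definition produces
theorem pvFM : ∀ l : List Char,
    List.filterMap (fun k => l[2*k]?) (List.range ((l.length+1)/2)) = pvEvens l := by
  intro l
  induction l using pvEvens.induct with
  | case1 => simp [pvEvens]
  | case2 c => simp [pvEvens, List.range_succ]
  | case3 c d t ih =>
    have hcount : ((c :: d :: t).length + 1)/2 = (t.length + 1)/2 + 1 := by
      simp [List.length_cons]; omega
    rw [hcount, List.range_succ_eq_map, List.filterMap_cons]
    simp only [List.filterMap_map, Function.comp_def]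
    simp only [show ∀ k:Nat, 2 * Nat.succ k = (2*k) + 1 + 1 from fun k => by omega]
    simp [List.getElem?_cons_succ, ih, pvEvens]

-- w[::2] is the even-position sublist
theorem pvSlice_none_none_two (l : List Char) :
    PySem.List.slice? l none none 2 = some (pvEvens l) := by
  rw [← pvFM]
  simp only [PySem.List.slice?, PySem.List.sliceIndices]
  norm_num
  have hc : (if 0 < l.length then ((l.length + 2 - 1 : Int)/2).toNat else 0) = (l.length+1)/2 := by
    split <;> omega
  rw [hc]
  have hx : ∀ x : Nat, ((2 * (x:Int))).toNat = 2*x := fun x => by omega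
  simp only [hx]

-- w[1::2] is the even-position sublist of the tail
theorem pvSlice_one_none_two (l : List Char) :
    PySem.List.slice? l (some 1) none 2 = some (pvEvens l.tail) := by
  cases l with
  | nil => decide
  | cons c t =>
    rw [List.tail_cons, ← pvFM]
    simp only [PySem.List.slice?, PySem.List.sliceIndices]
    norm_num
    have hc : (if 0 < t.length then ((t.length + 2 - 1 : Int)/2).toNat else 0)
        = (t.length+1)/2 := by
      split <;> omega
    rw [hc]
    congr 1
    funext k
    have h1 : ((1 : Int) + 2 * k).toNat = 2*k + 1 := by omega
    simp [h1]

-- the table lookup agrees with A's transform on every character code below 127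
set_option maxRecDepth 8192 in
theorem pvTableFin : ∀ n : Fin 127,
    PySem.Dict.getD pvTable (Char.ofNat n) (Char.ofNat n) = pvAShift (Char.ofNat n) := by decide

theorem pvTable_eq_shift (c : Char) (h : pvDomChar c = true) :
    PySem.Dict.getD pvTable c c = pvAShift c := by
  have hlt : c.toNat < 127 := by
    unfold pvDomChar at h
    simp at h
    omega
  have hc : Char.ofNat c.toNat = c := Char.ofNat_toNat c
  have := pvTableFin ⟨c.toNat, hlt⟩
  simpa [hc] using this

-- A's fold over the enumeration, started at any even index, is the interleaving of the
-- transformed even sublist with the odd sublist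
theorem pvFold_eq_assign (l : List Char) : ∀ (i : Int) (acc : List Char),
    PySem.Int.mod i 2 = 0 →
    (PySem.List.enumerate l i).foldl
      (fun tt p =>
        let textTrans :=
          if PySem.Int.mod p.1 2 = 0 then
            if PySem.Chars.isalpha p.2 then
              let t := Char.ofNat (p.2.toNat - 2)
              if t < 'A' then 'Z' else t
            else p.2
          else p.2
        tt ++ [textTrans]) acc
      = acc ++ pvAssign ((pvEvens l).map pvAShift) (pvEvens l.tail) := by
  induction l using pvEvens.induct with
  | case1 => intro i acc _; simp [PySem.List.enumerate_nil, pvEvens, pvAssign]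
  | case2 c =>
    intro i acc hi
    simp only [PySem.List.enumerate_cons, PySem.List.enumerate_nil, List.foldl_cons,
      List.foldl_nil, if_pos hi]
    simp [pvEvens, pvAssign, pvAShift]
  | case3 c d t ih =>
    intro i acc hi
    have e0 : PySem.Int.mod i 2 = i % 2 := PySem.Int.mod_eq_emod_of_pos (by norm_num)
    have e1 : PySem.Int.mod (i + 1) 2 = (i + 1) % 2 :=
      PySem.Int.mod_eq_emod_of_pos (by norm_num)
    rw [e0] at hi
    have h1 : PySem.Int.mod (i + 1) 2 ≠ 0 := by rw [e1]; omega
    have h2 : PySem.Int.mod (i + 1 + 1) 2 = 0 := by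
      rw [PySem.Int.mod_eq_emod_of_pos (by norm_num)]; omega
    have hi' : PySem.Int.mod i 2 = 0 := by rw [e0]; omega
    simp only [PySem.List.enumerate_cons, List.foldl_cons, if_pos hi', if_neg h1]
    rw [ih _ _ h2]
    simp only [pvEvens, List.tail_cons, pvEvens_cons_tail, List.map_cons, pvAssign]
    simp [pvAShift]

-- ===== VERDICT (by name: the statement is the Claim_ definition above) =====
theorem patternEven_spec : Claim_equal_patternEven := by
  intro w hw
  unfold Spec_patternEven patternEven
  rw [pvFold_eq_assign w.toList 0 [] (by decide)]
  simp only [patternEven_alt, pvSlice_none_none_two, pvSlice_one_none_two, Option.getD_some,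
    List.nil_append]
  have hmap : List.map (fun c => PySem.Dict.getD pvTable c c) (pvEvens w.toList)
      = List.map pvAShift (pvEvens w.toList) := by
    apply List.map_congr_left
    intro c hc
    have hcw : c ∈ w.toList := pvEvens_mem hc
    have hdom : pvDomChar c = true := by
      have hall := hw
      unfold Dom_patternEven pvDomStr at hall
      exact (List.all_eq_true.mp hall) c hcw
    exact pvTable_eq_shift c hdom
  rw [hmap]
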